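-- pv_equiv track=rewrite | github.com/giguerefrancoisx/PMG | COM/globplot.py | skipcolors
-- ===== SOURCE A (Python) =====
-- def skipcolors(subloc, linelist):
--     """Determines the offset for line colors"""
--
--     from collections import Counter
--     subvals = list(subloc.values())
--     inst = [0]*len(subvals)
--     for i, loc in enumerate(subvals):
--         inst[i] = inst[i] + Counter(subvals[:i])[loc]
--     offset = [['' for _ in range(i*len(linelist))]+linelist for i in inst]
--     offsetlist = dict(zip(list(subloc.keys()), offset))
--
--     return offsetlist
-- ===== SOURCE B (Python) =====
-- def skipcolors(subloc, linelist):
--     """Determines the offset for line colors"""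
--     keys = list(subloc.keys())
--     vals = list(subloc.values())
--     groups = {}
--     for i, v in enumerate(vals):
--         groups.setdefault(v, []).append(i)
--     inst = [0] * len(vals)
--     for positions in groups.values():
--         for rank, pos in enumerate(positions):
--             inst[pos] = rank
--     n = len(linelist)
--     return {k: [''] * (c * n) + linelist for k, c in zip(keys, inst)}
-- ===== Notes on version B (the rewrite author's own statement) =====
-- stated objective: alternative
-- what changed: Instead of recounting each prefix with a fresh Counter per index, B builds a dict grouping each value's positions in one pass and then writes each position's rank within its group (which equals its number of prior occurrences); total cost is dominated by constructing the offset lists, so it is not measurably faster.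
import Mathlib
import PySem

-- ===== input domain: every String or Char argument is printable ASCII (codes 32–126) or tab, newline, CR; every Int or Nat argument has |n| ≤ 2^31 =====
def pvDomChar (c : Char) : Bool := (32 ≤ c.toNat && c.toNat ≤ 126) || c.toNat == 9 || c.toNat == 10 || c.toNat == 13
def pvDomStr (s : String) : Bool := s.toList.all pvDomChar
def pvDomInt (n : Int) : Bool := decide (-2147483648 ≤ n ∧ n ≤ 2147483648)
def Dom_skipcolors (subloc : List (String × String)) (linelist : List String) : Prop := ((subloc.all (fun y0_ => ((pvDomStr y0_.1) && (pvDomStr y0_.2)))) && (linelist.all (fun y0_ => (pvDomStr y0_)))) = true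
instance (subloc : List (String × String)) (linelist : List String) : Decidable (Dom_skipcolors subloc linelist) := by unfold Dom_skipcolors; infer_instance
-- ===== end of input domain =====

-- B replaces A's per-index prefix recount (a fresh Counter for every position) by one grouping
-- pass (value -> list of positions) followed by a rank-assignment pass: a different traversal of the same data.


-- ===== PORT A =====
def skipcolors (subloc : List (String × String)) (linelist : List String) : List (String × List String) :=
  let d := PySem.Dict.mk subloc
  let subvals := d.values
  let inst : List Int := List.replicate subvals.length 0
  let inst := (PySem.List.enumerate subvals 0).foldl
    (fun inst p =>
      PySem.List.pySetD inst p.1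
        (PySem.List.pyGetD inst p.1 0 +
          (PySem.Dict.counter (PySem.List.slice subvals none (some p.1))).getD p.2 0)) inst
  let offset := inst.map (fun i =>
    (PySem.List.pyRange 0 (i * (linelist.length : Int)) 1).map (fun _ => "") ++ linelist)
  let offsetlist := (d.keys.zip offset).foldl (fun acc p => acc.insert p.1 p.2) PySem.Dict.empty
  offsetlist.items

-- ===== PORT B =====
def skipcolors_alt (subloc : List (String × String)) (linelist : List String) : List (String × List String) :=
  let d := PySem.Dict.mk subloc
  let keys := d.keys
  let vals := d.values
  let groups : PySem.Dict String (List Int) :=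
    (PySem.List.enumerate vals 0).foldl (fun g p => g.modify p.2 [] (· ++ [p.1])) PySem.Dict.empty
  let inst : List Int := List.replicate vals.length 0
  let inst := groups.values.foldl (fun inst positions =>
    (PySem.List.enumerate positions 0).foldl (fun inst rp => PySem.List.pySetD inst rp.2 rp.1) inst) inst
  let n : Int := (linelist.length : Int)
  ((keys.zip inst).foldl
      (fun acc p => acc.insert p.1 (PySem.List.pyRepeat [""] (p.2 * n) ++ linelist))
      PySem.Dict.empty).items

-- ===== PRECONDITION & SPEC =====
def Spec_skipcolors (subloc : List (String × String)) (linelist : List String) (out : List (String × List String)) : Prop := out = skipcolors_alt subloc linelist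
instance (subloc : List (String × String)) (linelist : List String) (out : List (String × List String)) : Decidable (Spec_skipcolors subloc linelist out) := by unfold Spec_skipcolors; infer_instance

-- ===== CLAIM (what is proved, stated in full; the proofs are below) =====
def Claim_equal_skipcolors : Prop := ∀ (subloc : List (String × String)) (linelist : List String), Dom_skipcolors subloc linelist → Spec_skipcolors subloc linelist (skipcolors subloc linelist)

-- ===== LEMMAS AND PROOFS =====

-- proof-side names for the two inst computations
def pvInstA (vals : List String) : List Int :=
  (PySem.List.enumerate vals 0).foldl
    (fun inst p =>
      PySem.List.pySetD inst p.1
        (PySem.List.pyGetD inst p.1 0 +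
          (PySem.Dict.counter (PySem.List.slice vals none (some p.1))).getD p.2 0))
    (List.replicate vals.length 0)

def pvGroups (vals : List String) : PySem.Dict String (List Int) :=
  (PySem.List.enumerate vals 0).foldl (fun g p => g.modify p.2 [] (· ++ [p.1])) PySem.Dict.empty

def pvInstB (vals : List String) : List Int :=
  (pvGroups vals).values.foldl (fun inst positions =>
    (PySem.List.enumerate positions 0).foldl (fun inst rp => PySem.List.pySetD inst rp.2 rp.1) inst)
    (List.replicate vals.length 0)

-- positions of value v among vals
def pvPos (vals : List String) (v : String) : List Nat :=
  (List.range vals.length).filter (fun i => vals.getD i "" == v)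

-- a flat write loop
def pvW (ws : List (Int × Int)) (inst : List Int) : List Int :=
  ws.foldl (fun l w => PySem.List.pySetD l w.1 w.2) inst

lemma pvFoldl_set_length {α : Type} (l : List α) (f : α → Int) (g : List Int → α → Int) :
    ∀ inst : List Int, (l.foldl (fun acc w => PySem.List.pySetD acc (f w) (g acc w)) inst).length = inst.length := by
  induction l with
  | nil => intro inst; rfl
  | cons w rest ih => intro inst; rw [List.foldl_cons, ih, PySem.List.length_pySetD]

lemma pvW_nowrite (ws : List (Int × Int)) (inst : List Int) (j : Nat)
    (hpos : ∀ w ∈ ws, 0 ≤ w.1) (hnj : ∀ w ∈ ws, w.1 ≠ (j : Int)) :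
    (pvW ws inst).getD j 0 = inst.getD j 0 := by
  induction ws generalizing inst with
  | nil => rfl
  | cons w rest ih =>
    have h0 : (0:Int) ≤ w.1 := hpos w (by simp)
    have hne : w.1.toNat ≠ j := by
      intro h; exact hnj w (by simp) (by omega)
    simp only [pvW, List.foldl_cons]
    rw [show (rest.foldl (fun l w => PySem.List.pySetD l w.1 w.2)
        (PySem.List.pySetD inst w.1 w.2)) = pvW rest (PySem.List.pySetD inst w.1 w.2) from rfl]
    rw [ih _ (fun x hx => hpos x (by simp [hx])) (fun x hx => hnj x (by simp [hx]))]
    rw [PySem.List.pySetD_of_nonneg _ _ h0]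
    simp [List.getD_eq_getElem?_getD, List.getElem?_set_ne hne]

lemma pvW_write (ws : List (Int × Int)) (inst : List Int) (j : Nat) (a : Int)
    (hlen : j < inst.length) (hpos : ∀ w ∈ ws, 0 ≤ w.1)
    (hnd : (ws.map (·.1)).Nodup) (hmem : ((j : Int), a) ∈ ws) :
    (pvW ws inst).getD j 0 = a := by
  induction ws generalizing inst with
  | nil => cases hmem
  | cons w rest ih =>
    simp only [List.map_cons, List.nodup_cons] at hnd
    rcases List.mem_cons.mp hmem with h | h
    · subst h
      simp only [pvW, List.foldl_cons]
      rw [show (rest.foldl (fun l w => PySem.List.pySetD l w.1 w.2)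
          (PySem.List.pySetD inst (j:Int) a)) = pvW rest (PySem.List.pySetD inst (j:Int) a) from rfl]
      rw [pvW_nowrite _ _ _ (fun x hx => hpos x (by simp [hx]))
          (fun x hx hxj => hnd.1 (List.mem_map.mpr ⟨x, hx, hxj⟩))]
      rw [PySem.List.pySetD_of_nonneg _ _ (by positivity)]
      simp [List.getD_eq_getElem?_getD, hlen]
    · have hw1 : w.1 ≠ (j : Int) := by
        intro he
        exact hnd.1 (List.mem_map.mpr ⟨(↑j, a), h, he.symm⟩)
      simp only [pvW, List.foldl_cons]
      rw [show (rest.foldl (fun l w => PySem.List.pySetD l w.1 w.2)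
          (PySem.List.pySetD inst w.1 w.2)) = pvW rest (PySem.List.pySetD inst w.1 w.2) from rfl]
      exact ih _ (by rw [PySem.List.length_pySetD]; exact hlen)
        (fun x hx => hpos x (by simp [hx])) hnd.2 h

lemma pvCountP_range (vals : List String) (v : String) :
    ∀ j, j ≤ vals.length →
      (List.range j).countP (fun i => vals.getD i "" == v) = (vals.take j).count v := by
  intro j
  induction j with
  | zero => simp
  | succ j ih =>
    intro hj
    have hjl : j < vals.length := by omega
    rw [List.range_succ, List.countP_append, List.take_add_one, List.count_append, ih (by omega)]
    have hg : vals[j]? = some vals[j] := List.getElem?_eq_getElem hjl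
    simp only [hg, Option.toList_some, List.countP_cons, List.countP_nil,
      List.getD_eq_getElem?_getD, List.count_cons, List.count_nil]
    rcases eq_or_ne vals[j] v with h | h <;> simp [h, beq_iff_eq]

lemma pvPos_getElem (vals : List String) (j : Nat) (hj : j < vals.length) :
    (pvPos vals (vals.getD j ""))[(vals.take j).count (vals.getD j "")]? = some j := by
  set v := vals.getD j "" with hv
  set p : Nat → Bool := fun i => vals.getD i "" == v with hp
  have hpj : p j = true := by rw [hp, hv]; simp
  have hsplit : List.range vals.length
      = List.range (j+1) ++ (List.range (vals.length - (j+1))).map (fun x => (j+1) + x) := by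
    rw [← List.range_add]; congr 1; omega
  have hP : pvPos vals v = (List.range j).filter p
      ++ j :: ((List.range (vals.length - (j+1))).map (fun x => (j+1) + x)).filter p := by
    unfold pvPos
    rw [← hp, hsplit, List.filter_append, List.range_succ, List.filter_append,
      List.filter_singleton, hpj]
    simp
  have hlen : ((List.range j).filter p).length = (vals.take j).count v := by
    rw [← List.countP_eq_length_filter, hp]
    exact pvCountP_range vals v j (by omega)
  rw [hP, List.getElem?_append_right hlen.le, hlen, Nat.sub_self]
  simp

-- A side
lemma pvFoldA (vals : List String) :
    ∀ (l : List String) (s : Nat) (inst : List Int),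
      inst.length = s + l.length →
      (∀ i : Nat, s ≤ i → inst.getD i 0 = 0) →
      ∀ j : Nat,
        ((PySem.List.enumerate l (s : Int)).foldl
          (fun inst p =>
            PySem.List.pySetD inst p.1
              (PySem.List.pyGetD inst p.1 0 +
                (PySem.Dict.counter (PySem.List.slice vals none (some p.1))).getD p.2 0))
          inst).getD j 0 =
        if s ≤ j ∧ j < s + l.length then ((vals.take j).count (l.getD (j - s) "") : Int)
        else inst.getD j 0 := by
  intro l
  induction l with
  | nil =>
    intro s inst hlen hz j
    rw [PySem.List.enumerate_nil]
    simp only [List.foldl_nil, List.length_nil]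
    rw [if_neg (by omega)]
  | cons x rest ih =>
    intro s inst hlen hz j
    rw [PySem.List.enumerate_cons, List.foldl_cons]
    have hx0 : PySem.List.pyGetD inst (s : Int) 0 = 0 := by
      rw [PySem.List.pyGetD_natCast]; exact hz s le_rfl
    set c : Int := ((vals.take s).count x : Int) with hc
    have hval : (PySem.Dict.counter (PySem.List.slice vals none (some (s:Int)))).getD x 0 = c := by
      rw [PySem.List.slice_to _ (by positivity), PySem.Dict.getD_counter]
      simp [hc]
    have hstep : PySem.List.pySetD inst (s : Int)
        (PySem.List.pyGetD inst (s : Int) 0 +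
          (PySem.Dict.counter (PySem.List.slice vals none (some (s:Int)))).getD x 0)
        = inst.set s c := by
      rw [hx0, hval, zero_add, PySem.List.pySetD_of_nonneg _ _ (by positivity)]
      simp
    have hcast : ((s : Int) + 1) = ((s + 1 : Nat) : Int) := by push_cast; ring
    rw [hstep, hcast, ih (s+1) (inst.set s c) (by simp [hlen]; omega)
      (fun i hi => by
        have hne : s ≠ i := by omega
        rw [List.getD_eq_getElem?_getD, List.getElem?_set_ne hne, ← List.getD_eq_getElem?_getD]
        exact hz i (by omega)) j]
    by_cases h1 : s + 1 ≤ j ∧ j < s + 1 + rest.length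
    · have h2 : s ≤ j ∧ j < s + (x :: rest).length := by simp; omega
      rw [if_pos h1, if_pos h2]
      have hd : (x :: rest).getD (j - s) "" = rest.getD (j - (s+1)) "" := by
        have he : j - s = (j - (s+1)) + 1 := by omega
        rw [he]; rfl
      rw [hd]
    · rw [if_neg h1]
      by_cases h2 : s ≤ j ∧ j < s + (x :: rest).length
      · have hjs : s = j := by simp at h1 h2; omega
        subst hjs
        rw [if_pos h2]
        have hsl : s < inst.length := by simp at hlen ⊢; omega
        simp [List.getD_eq_getElem?_getD, hsl, hc]
      · rw [if_neg h2]
        have hne : s ≠ j := by simp at h1 h2; omega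
        rw [List.getD_eq_getElem?_getD, List.getElem?_set_ne hne, ← List.getD_eq_getElem?_getD]

lemma pvInstA_getD (vals : List String) (j : Nat) (hj : j < vals.length) :
    (pvInstA vals).getD j 0 = ((vals.take j).count (vals.getD j "") : Int) := by
  unfold pvInstA
  have h := pvFoldA vals vals 0 (List.replicate vals.length 0) (by simp)
    (fun i _ => by
      rw [List.getD_eq_getElem?_getD, List.getElem?_replicate]
      split <;> rfl) j
  simp only [Nat.cast_zero] at h
  rw [h, if_pos ⟨Nat.zero_le _, by omega⟩]
  simp

lemma pvInstA_length (vals : List String) : (pvInstA vals).length = vals.length := by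
  unfold pvInstA
  exact (pvFoldl_set_length (PySem.List.enumerate vals 0) (fun p => p.1)
    (fun acc p => PySem.List.pyGetD acc p.1 0 +
      (PySem.Dict.counter (PySem.List.slice vals none (some p.1))).getD p.2 0)
    (List.replicate vals.length 0)).trans (List.length_replicate)

-- B side
lemma pvGroups_getD (vals : List String) (v : String) :
    (pvGroups vals).getD v [] = (pvPos vals v).map (fun i : Nat => (i : Int)) := by
  unfold pvGroups
  have h1 : (List.foldl (fun g (p : Int × String) => g.modify p.2 [] (· ++ [p.1])) PySem.Dict.empty (PySem.List.enumerate vals 0))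
      = (List.foldl (fun d (q : String × Int) => d.modify q.1 [] (· ++ [q.2])) PySem.Dict.empty ((PySem.List.enumerate vals 0).map Prod.swap)) := by
    rw [List.foldl_map]; exact rfl
  rw [h1, PySem.Dict.getD_foldl_modify_append]
  rw [PySem.List.enumerate_eq_map_pyRange vals ""]
  unfold pvPos
  simp [List.filter_map, List.map_map, Function.comp_def, PySem.List.pyRange_one,
    PySem.List.len_eq, PySem.List.pyGetD_natCast, List.getD_eq_getElem?_getD]

lemma pvGroups_keys (vals : List String) : (pvGroups vals).keys = PySem.Set.ofList vals := by
  unfold pvGroups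
  exact (PySem.Dict.keys_foldl_modify_key (PySem.List.enumerate vals 0) (fun p => p.2) []
    (fun _ p => (· ++ [p.1])) PySem.Dict.empty).trans
    (by rw [PySem.List.map_snd_enumerate]; rfl)

lemma pvFoldl_flat (gs : List (List Int)) (inst : List Int) :
    gs.foldl (fun inst positions =>
      (PySem.List.enumerate positions 0).foldl (fun inst rp => PySem.List.pySetD inst rp.2 rp.1) inst) inst
    = pvW (gs.flatMap (fun ps => (PySem.List.enumerate ps 0).map Prod.swap)) inst := by
  induction gs generalizing inst with
  | nil => rfl
  | cons g rest ih =>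
    rw [List.foldl_cons, ih, List.flatMap_cons]
    unfold pvW
    rw [List.foldl_append, List.foldl_map]
    rfl

lemma pvMem_pvPos (vals : List String) (v : String) (i : Nat) :
    i ∈ pvPos vals v ↔ i < vals.length ∧ vals.getD i "" = v := by
  unfold pvPos
  simp [List.mem_filter, List.mem_range, beq_iff_eq]

lemma pvInstB_getD (vals : List String) (j : Nat) (hj : j < vals.length) :
    (pvInstB vals).getD j 0 = ((vals.take j).count (vals.getD j "") : Int) := by
  unfold pvInstB
  rw [pvFoldl_flat]
  have hnodupK : (pvGroups vals).keys.Nodup := by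
    rw [pvGroups_keys]; exact PySem.Set.nodup_ofList vals
  have hvals : (pvGroups vals).values
      = (PySem.Set.ofList vals).map (fun v => (pvPos vals v).map (fun i : Nat => (i : Int))) := by
    rw [PySem.Dict.values_eq_map_keys _ hnodupK [], pvGroups_keys]
    exact List.map_congr_left (fun v _ => pvGroups_getD vals v)
  rw [hvals, List.flatMap_map]
  apply pvW_write
  · simpa using hj
  · -- every written position is a Nat cast
    intro w hw
    rcases List.mem_flatMap.mp hw with ⟨v, hv, hw2⟩
    rcases List.mem_map.mp hw2 with ⟨p, hp, rfl⟩
    rcases (PySem.List.mem_enumerate_iff _ _ _).mp hp with ⟨k, hk, rfl⟩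
    simp only [Prod.swap_prod_mk, List.getElem_map]
    positivity
  · -- written positions are pairwise distinct
    rw [List.map_flatMap]
    have hsame : ∀ v : String,
        ((PySem.List.enumerate ((pvPos vals v).map (fun i : Nat => (i:Int))) 0).map Prod.swap).map (fun w : Int × Int => w.1)
        = (pvPos vals v).map (fun i : Nat => (i:Int)) := by
      intro v
      rw [List.map_map]
      have h2 : ((fun w : Int × Int => w.1) ∘ Prod.swap) = (fun p : Int × Int => p.2) := rfl
      rw [h2, PySem.List.map_snd_enumerate]
    rw [show (fun v => ((PySem.List.enumerate ((pvPos vals v).map (fun i : Nat => (i:Int))) 0).map Prod.swap).map (fun w : Int × Int => w.1))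
        = (fun v => (pvPos vals v).map (fun i : Nat => (i:Int))) from funext hsame]
    rw [List.nodup_flatMap]
    constructor
    · intro v _
      unfold pvPos
      exact ((List.nodup_range).filter _).map (fun a b h => by exact_mod_cast h)
    · refine (PySem.Set.nodup_ofList vals).imp ?_
      intro v w hvw x hxv hxw
      rcases List.mem_map.mp hxv with ⟨i, hi, rfl⟩
      rcases List.mem_map.mp hxw with ⟨i', hi', he⟩
      have hii : i' = i := by exact_mod_cast he
      subst hii
      have h1 := (pvMem_pvPos vals v i').mp hi
      have h2 := (pvMem_pvPos vals w i').mp hi'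
      exact hvw (h1.2 ▸ h2.2 ▸ rfl)
  · -- the write (j, prefix count of vals[j]) occurs
    set v := vals.getD j "" with hv
    have hvmem : v ∈ PySem.Set.ofList vals := by
      rw [PySem.Set.mem_ofList]
      rw [hv, List.getD_eq_getElem?_getD, List.getElem?_eq_getElem hj]
      exact List.getElem_mem hj
    refine List.mem_flatMap.mpr ⟨v, hvmem, ?_⟩
    refine List.mem_map.mpr ⟨((((vals.take j).count v : Nat) : Int), (j : Int)), ?_, rfl⟩
    rw [PySem.List.mem_enumerate_iff]
    have hg := pvPos_getElem vals j hj
    rw [← hv] at hg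
    rcases List.getElem?_eq_some_iff.mp hg with ⟨hlt, hval⟩
    refine ⟨(vals.take j).count v, by simpa using hlt, ?_⟩
    simp [hval]

lemma pvInstB_length (vals : List String) : (pvInstB vals).length = vals.length := by
  unfold pvInstB
  rw [pvFoldl_flat]
  unfold pvW
  exact (pvFoldl_set_length _ (fun w : Int × Int => w.1) (fun _ (w : Int × Int) => w.2) _).trans (List.length_replicate)

-- the two inst lists coincide
lemma pvInstAB (vals : List String) : pvInstA vals = pvInstB vals := by
  apply List.ext_getElem
  · rw [pvInstA_length, pvInstB_length]
  · intro j h1 h2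
    have hj : j < vals.length := by rw [pvInstA_length] at h1; exact h1
    have a := pvInstA_getD vals j hj
    have b := pvInstB_getD vals j hj
    rw [List.getD_eq_getElem?_getD, List.getElem?_eq_getElem h1] at a
    rw [List.getD_eq_getElem?_getD, List.getElem?_eq_getElem h2] at b
    simpa using a.trans b.symm

-- the two offset constructions coincide
lemma pvOff (linelist : List String) (c : Int) :
    (PySem.List.pyRange 0 (c * (linelist.length : Int)) 1).map (fun _ => "") ++ linelist
    = PySem.List.pyRepeat [""] (c * (linelist.length : Int)) ++ linelist := by
  rw [PySem.List.pyRepeat_singleton, PySem.List.pyRange_one]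
  congr 1
  rw [List.map_map,
    show ((fun _ => "") ∘ fun k : Nat => ((0:Int) + (k:Int))) = (fun _ : Nat => "") from rfl,
    List.map_const', List.length_range]
  congr 1
  omega

-- final assembly over arbitrary key/value lists
lemma pvAssemble (keys vals linelist : List String) :
    ((keys.zip ((pvInstA vals).map (fun i =>
        (PySem.List.pyRange 0 (i * (linelist.length : Int)) 1).map (fun _ => "") ++ linelist))).foldl
      (fun acc p => acc.insert p.1 p.2) PySem.Dict.empty).items
    = ((keys.zip (pvInstB vals)).foldl
      (fun acc p => acc.insert p.1 (PySem.List.pyRepeat [""] (p.2 * (linelist.length : Int)) ++ linelist))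
      PySem.Dict.empty).items := by
  rw [pvInstAB, List.zip_map_right, List.foldl_map]
  have hf : (fun (acc : PySem.Dict String (List String)) (p : String × Int) =>
      acc.insert (Prod.map id (fun i : Int =>
        (PySem.List.pyRange 0 (i * (linelist.length : Int)) 1).map (fun _ => "") ++ linelist) p).1
        (Prod.map id (fun i : Int =>
          (PySem.List.pyRange 0 (i * (linelist.length : Int)) 1).map (fun _ => "") ++ linelist) p).2)
      = (fun acc p => acc.insert p.1 (PySem.List.pyRepeat [""] (p.2 * (linelist.length : Int)) ++ linelist)) := by
    funext acc p
    rw [Prod.map_fst, Prod.map_snd, id_eq, pvOff]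
  rw [hf]

-- ===== VERDICT (by name: the statement is the Claim_ definition above) =====
theorem skipcolors_spec : Claim_equal_skipcolors := by
  intro subloc linelist _
  unfold Spec_skipcolors
  show (((PySem.Dict.mk subloc).keys.zip ((pvInstA (PySem.Dict.mk subloc).values).map (fun i =>
      (PySem.List.pyRange 0 (i * (linelist.length : Int)) 1).map (fun _ => "") ++ linelist))).foldl
      (fun acc p => acc.insert p.1 p.2) PySem.Dict.empty).items
    = (((PySem.Dict.mk subloc).keys.zip (pvInstB (PySem.Dict.mk subloc).values)).foldl
      (fun acc p => acc.insert p.1 (PySem.List.pyRepeat [""] (p.2 * (linelist.length : Int)) ++ linelist))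
      PySem.Dict.empty).items
  exact pvAssemble _ _ _
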